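-- pv_equiv track=rewrite | github.com/ScorpiusZ/chaos | codeforfun/python/tool/SUtils.py | validId
-- ===== SOURCE A (Python) =====
-- def validId(Iid):
--     powers=('7','9','10','5','8','4','2','1','6','3','7','9','10','5','8','4','2')
--     parityBits=('1','0','X','9','8','7','6','5','4','3','2')
--     parityBit=Iid[-1]
--     ids=map(int,Iid[0:17])
--     index=int(sum([a*b for a,b in zip(ids,map(int,powers))])%11)
--     if parityBits[index]==parityBit:
--         return True
--     else:
--         return False
-- ===== SOURCE B (Python) =====
-- def validId(Iid):
--     # Horner evaluation: the weight table of A is 2^(17-k) mod 11, so a running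
--     # modular accumulator replaces the tabulated weighted sum.
--     parityBits = "10X98765432"
--     parityBit = Iid[-1]
--     acc = 0
--     n = 0
--     for c in Iid[:17]:
--         acc = (acc * 2 + int(c)) % 11
--         n += 1
--     index = acc * pow(2, 18 - n, 11) % 11
--     return parityBits[index] == parityBit
-- ===== Notes on version B (the rewrite author's own statement) =====
-- stated objective: alternative
-- what changed: The tabulated weight tuple and the zip/dot-product sum are replaced by a Horner-rule running accumulator acc=(acc*2+digit)%11 (the weights are 2^(17-k) mod 11), with a final modular power pow(2,18-n,11) restoring the exponent offset; no weights table, no zip, no list building.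
import Mathlib
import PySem

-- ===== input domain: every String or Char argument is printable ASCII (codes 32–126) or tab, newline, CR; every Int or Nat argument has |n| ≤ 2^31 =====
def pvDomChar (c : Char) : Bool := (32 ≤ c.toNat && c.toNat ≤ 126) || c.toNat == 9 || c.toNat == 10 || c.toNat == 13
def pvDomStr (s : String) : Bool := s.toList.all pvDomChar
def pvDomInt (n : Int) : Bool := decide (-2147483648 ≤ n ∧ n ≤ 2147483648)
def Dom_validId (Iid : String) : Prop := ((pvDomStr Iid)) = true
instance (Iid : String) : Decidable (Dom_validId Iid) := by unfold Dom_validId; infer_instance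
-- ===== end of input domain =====

-- B replaces A's weight table + zip/dot-product by a Horner-rule running accumulator
-- (the weights are 2^(17-k) mod 11) with a final modular power; alternative decomposition, same cost.

-- ===== PORT A =====
def validId (Iid : String) : Bool :=
  let powers : List Int :=
    (["7","9","10","5","8","4","2","1","6","3","7","9","10","5","8","4","2"]).map
      (fun s => (PySem.Int.ofChars? s.toList).getD 0)   -- map(int, powers); never none on these literals
  let parityBits : List Char := ['1','0','X','9','8','7','6','5','4','3','2']
  match PySem.List.pyGet? Iid.toList (-1) with           -- Iid[-1]; none = IndexError (outside Pre_)
  | none => false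
  | some parityBit =>
    let idsOpt : List (Option Int) :=
      (PySem.List.slice Iid.toList (some 0) (some 17)).map (fun c => PySem.Int.ofChars? [c])  -- map(int, Iid[0:17])
    if idsOpt.all Option.isSome then
      let ids : List Int := idsOpt.map (fun o => o.getD 0)
      let index : Int := PySem.Int.mod (((List.zip ids powers).map (fun ab => ab.1 * ab.2)).sum) 11
      match PySem.List.pyGet? parityBits index with
      | none => false
      | some p => p == parityBit
    else false                                           -- int() raised ValueError (outside Pre_)

-- ===== PORT B =====
def validId_alt (Iid : String) : Bool :=
  let parityBits : List Char := "10X98765432".toList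
  match PySem.List.pyGet? Iid.toList (-1) with           -- Iid[-1]
  | none => false
  | some parityBit =>
    let st? : Option (Int × Nat) :=                      -- for c in Iid[:17]: acc = (acc*2+int(c)) % 11; n += 1
      (PySem.List.slice Iid.toList none (some 17)).foldl
        (fun o c => o.bind (fun st =>
          (PySem.Int.ofChars? [c]).map (fun d => (PySem.Int.mod (st.1 * 2 + d) 11, st.2 + 1))))
        (some (0, 0))
    match st? with
    | none => false                                      -- int() raised ValueError (outside Pre_)
    | some (acc, n) =>
      let index : Int := PySem.Int.mod (acc * PySem.Int.powMod 2 (18 - n) 11) 11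
      match PySem.List.pyGet? parityBits index with
      | none => false
      | some p => p == parityBit

-- ===== PRECONDITION & SPEC =====
-- Pre_ excludes exactly the inputs where the Python A raises: the empty string (IndexError on
-- Iid[-1]) and strings whose first min(17, len) characters are not all decimal digits (ValueError in int()).
def Pre_validId (Iid : String) : Prop :=
  Iid.toList ≠ [] ∧ (Iid.toList.take 17).all Char.isDigit = true
instance (Iid : String) : Decidable (Pre_validId Iid) := by unfold Pre_validId; infer_instance

def pvWitness_validId : String := "11010519491231002X"

def Spec_validId (Iid : String) (out : Bool) : Prop := out = validId_alt Iid
instance (Iid : String) (out : Bool) : Decidable (Spec_validId Iid out) := by unfold Spec_validId; infer_instance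

-- ===== CLAIM (what is proved, stated in full; the proofs are below) =====
def Claim_equal_validId : Prop := ∀ (Iid : String), Dom_validId Iid → Pre_validId Iid → Spec_validId Iid (validId Iid)

-- ===== LEMMAS AND PROOFS =====

-- A's integer weight table, the digit value of a character, B's Horner step
def pvPows : List Int := [7, 9, 10, 5, 8, 4, 2, 1, 6, 3, 7, 9, 10, 5, 8, 4, 2]
def pvDval (c : Char) : Int := (c.toNat : Int) - 48
def pvHstep (a : Int) (c : Char) : Int := (a * 2 + pvDval c) % 11

-- int(c) on a decimal-digit character returns its value
lemma pv_ofChars_digit (c : Char) (h : c.isDigit = true) :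
    PySem.Int.ofChars? [c] = some (pvDval c) := by
  have hb : 48 ≤ c.toNat ∧ c.toNat ≤ 57 := by
    simp [Char.isDigit] at h
    exact ⟨h.1, h.2⟩
  obtain ⟨h1, h2⟩ := hb
  have hc : c = Char.ofNat c.toNat := (Char.ofNat_toNat c).symm
  set n := c.toNat with hn
  interval_cases n <;> (rw [hc]; decide)

-- A's zip/dot-product sum as a structural recursion
def pvWsum : List Char → List Int → Int
  | c :: cs, w :: ws => pvDval c * w + pvWsum cs ws
  | _, _ => 0

lemma pv_zipsum (cs : List Char) : ∀ (ws : List Int),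
    ((List.zip (cs.map pvDval) ws).map (fun ab => ab.1 * ab.2)).sum = pvWsum cs ws := by
  induction cs with
  | nil => intro ws; cases ws <;> simp [pvWsum]
  | cons c t ih =>
    intro ws
    cases ws with
    | nil => simp [pvWsum]
    | cons w ws => simp [pvWsum, ih]

-- each weight of A's table is congruent to the corresponding power of two mod 11
lemma pv_pows_mod (j : Nat) (h : j < 17) :
    pvPows.getD j 0 % 11 = (2 : Int) ^ (17 - j) % 11 := by
  interval_cases j <;> decide

-- Horner invariant: the weighted tail sum with accumulator acc is Horner's fold, up to the 2-power offset
lemma pv_key : ∀ (cs : List Char) (j : Nat) (acc : Int), cs.length + j ≤ 17 →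
    Int.ModEq 11 (acc * 2 ^ (18 - j) + pvWsum cs (pvPows.drop j))
      (cs.foldl pvHstep (acc % 11) * 2 ^ (18 - j - cs.length)) := by
  intro cs
  induction cs with
  | nil =>
    intro j acc _
    simp only [List.foldl_nil, List.length_nil, Nat.sub_zero]
    cases pvPows.drop j <;>
      · show _ % (11:Int) = _ % 11
        simp [pvWsum, Int.mul_emod, Int.emod_emod_of_dvd]
  | cons c t ih =>
    intro j acc hlen
    simp only [List.length_cons] at hlen
    have hj : j < 17 := by omega
    have hjl : j < pvPows.length := by simpa [pvPows] using hj
    rw [List.drop_eq_getElem_cons hjl]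
    simp only [pvWsum, List.foldl_cons, List.length_cons]
    have hg : pvPows[j] = pvPows.getD j 0 := (List.getD_eq_getElem _ _ hjl).symm
    have hmod : Int.ModEq 11 (pvDval c * pvPows[j]) (pvDval c * 2 ^ (17 - j)) := by
      rw [hg]; exact Int.ModEq.mul_left _ (pv_pows_mod j hj)
    have hpow : (2:Int) ^ (18 - j) = 2 ^ (17 - j) * 2 := by
      rw [← pow_succ]; congr 1; omega
    calc acc * 2 ^ (18 - j) + (pvDval c * pvPows[j] + pvWsum t (pvPows.drop (j+1)))
        ≡ acc * 2 ^ (18 - j) + (pvDval c * 2 ^ (17 - j) + pvWsum t (pvPows.drop (j+1))) [ZMOD 11] :=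
          (Int.ModEq.add_left _ (Int.ModEq.add_right _ hmod))
      _ = (acc * 2 + pvDval c) * 2 ^ (18 - (j+1)) + pvWsum t (pvPows.drop (j+1)) := by
          rw [hpow]
          have : 18 - (j+1) = 17 - j := by omega
          rw [this]; ring
      _ ≡ t.foldl pvHstep ((acc * 2 + pvDval c) % 11) * 2 ^ (18 - (j+1) - t.length) [ZMOD 11] := by
          have := ih (j + 1) (acc * 2 + pvDval c) (by omega)
          simpa using this
      _ = t.foldl pvHstep (pvHstep (acc % 11) c) * 2 ^ (18 - j - (t.length + 1)) := by
          have h1 : pvHstep (acc % 11) c = (acc * 2 + pvDval c) % 11 := by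
            unfold pvHstep; omega
          rw [h1]
          congr 2
          omega

-- B's option-state fold on an all-digit prefix is the pure Horner fold plus the length count
lemma pv_fold_some (cs : List Char) : ∀ (a : Int) (m : Nat), cs.all Char.isDigit = true →
    cs.foldl
        (fun o c => o.bind (fun st =>
          (PySem.Int.ofChars? [c]).map (fun d => (PySem.Int.mod (st.1 * 2 + d) 11, st.2 + 1))))
        (some (a, m))
      = some (cs.foldl pvHstep a, m + cs.length) := by
  induction cs with
  | nil => intro a m _; simp
  | cons c t ih =>
    intro a m hall
    simp only [List.all_cons, Bool.and_eq_true] at hall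
    simp only [List.foldl_cons, Option.bind_some, pv_ofChars_digit c hall.1, Option.map_some]
    rw [ih _ _ hall.2]
    have : PySem.Int.mod (a * 2 + pvDval c) 11 = pvHstep a c := by
      rw [PySem.Int.mod_eq_emod_of_pos (by norm_num)]; rfl
    rw [this]
    simp [List.length_cons]
    omega

-- ===== VERDICT (by name: the statement is the Claim_ definition above) =====
theorem validId_spec : Claim_equal_validId := by
  unfold Claim_equal_validId
  intro Iid _hdom hpre
  obtain ⟨hne, hdig⟩ := hpre
  unfold Spec_validId
  have hslice0 : PySem.List.slice Iid.toList (some 0) (some 17) = Iid.toList.take 17 := by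
    simp [pysem]
  have hslice1 : PySem.List.slice Iid.toList none (some 17) = Iid.toList.take 17 := by
    simp [pysem]
  obtain ⟨pb, hpb⟩ := Option.isSome_iff_exists.mp (List.getLast?_isSome.mpr hne)
  have hget : PySem.List.pyGet? Iid.toList (-1) = some pb := by
    rw [PySem.List.pyGet?_neg_one, hpb]
  set cs := Iid.toList.take 17 with hcs
  have hdig' : ∀ c ∈ cs, c.isDigit = true := by
    rw [List.all_eq_true] at hdig; exact fun c hc => hdig c hc
  have hmapids : cs.map (fun c => PySem.Int.ofChars? [c]) = cs.map (fun c => some (pvDval c)) :=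
    List.map_congr_left (fun c hc => pv_ofChars_digit c (hdig' c hc))
  have hidx : (pvWsum cs pvPows) % 11
      = (cs.foldl pvHstep 0 * 2 ^ (18 - cs.length)) % 11 := by
    have := pv_key cs 0 0 (by simp [hcs])
    simpa using this
  have hpows : (["7","9","10","5","8","4","2","1","6","3","7","9","10","5","8","4","2"]).map
      (fun s => (PySem.Int.ofChars? s.toList).getD 0) = pvPows := by decide
  have hpar : ("10X98765432".toList) = (['1','0','X','9','8','7','6','5','4','3','2'] : List Char) := by
    decide
  unfold validId validId_alt
  rw [hget]
  simp only [hslice0, hslice1, hmapids, hpows, hpar]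
  rw [pv_fold_some cs 0 0 hdig]
  simp only [List.all_map, Option.isSome_some, List.all_eq_true, implies_true, if_true,
    List.map_map, Function.comp_def, Option.getD_some]
  rw [pv_zipsum cs pvPows]
  rw [PySem.Int.mod_eq_emod_of_pos (by norm_num), PySem.Int.mod_eq_emod_of_pos (by norm_num)]
  have hpm : PySem.Int.powMod 2 (18 - (0 + cs.length)) 11 = (2 ^ (18 - cs.length) : Int) % 11 := by
    unfold PySem.Int.powMod
    rw [PySem.Int.mod_eq_emod_of_pos (by norm_num)]
    norm_num
  rw [hpm]
  have hmul : ∀ a b : Int, (a * (b % 11)) % 11 = (a * b) % 11 := by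
    intro a b
    conv_lhs => rw [Int.mul_emod, Int.emod_emod_of_dvd _ (dvd_refl _), ← Int.mul_emod]
  rw [hmul, ← hidx]
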